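-- pv_equiv track=rewrite | github.com/SomilKSharma/AdvancedDSA | Queues/perfect.py | solve
-- ===== SOURCE A (Python) =====
-- from collections import deque
--
-- def solve(A):
--
--     #create a queue and add initial value
--     queue=deque()
--     queue.append('11')
--     queue.append('22')
--
--     #get the answer variable that will store the Ath number
--     answer=''
--     #iterate for Ath values
--     for _ in range(A):
--         #get the value
--         answer=queue.popleft()
--         #get the length of answer
--         length=len(answer)
--         #put the answer into the queue with modified value
--         queue.append(answer[:length//2]+'11'+answer[length//2:])
--         queue.append(answer[:length//2]+'22'+answer[length//2:])
--
--     #return the answer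
--     return answer
-- ===== SOURCE B (Python) =====
-- def solve(A):
--     # A-th element of the middle-insertion BFS: node index m = A+1 in heap
--     # numbering; the binary digits of m below the MSB give the path, each
--     # digit contributes '1' (left) or '2' (right); the string is that digit
--     # word followed by its reverse.
--     if A <= 0:
--         return ''
--     half = ''.join('1' if b == '0' else '2' for b in bin(A + 1)[3:])
--     return half + half[::-1]
-- ===== Notes on version B (the rewrite author's own statement) =====
-- stated objective: faster
-- what changed: B replaces the BFS queue simulation (A pops and grows a deque A times) with a closed form: the answer is determined by the binary digits of A+1 below the most significant bit, mapped to '1'/'2' and mirrored.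
import Mathlib
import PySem

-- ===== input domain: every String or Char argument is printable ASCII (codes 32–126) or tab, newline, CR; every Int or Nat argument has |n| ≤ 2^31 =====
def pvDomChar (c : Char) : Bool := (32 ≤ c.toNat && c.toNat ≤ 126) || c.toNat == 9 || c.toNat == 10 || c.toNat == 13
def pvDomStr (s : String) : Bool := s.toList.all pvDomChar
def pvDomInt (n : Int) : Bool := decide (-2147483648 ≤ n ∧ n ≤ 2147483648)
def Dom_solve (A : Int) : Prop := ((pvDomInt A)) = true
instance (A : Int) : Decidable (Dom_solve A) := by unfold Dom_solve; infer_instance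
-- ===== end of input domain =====

-- B computes the answer directly from the binary digits of A+1 instead of simulating A's queue: asymptotically faster (O(log A) vs O(A log A)).

-- ===== PORT A =====
-- one loop iteration: popleft the answer, append the two middle-inserted children
-- (answer[:length//2] / answer[length//2:] are exactly take/drop, since 0 ≤ length//2 ≤ len)
def solveStep (st : List (List Char) × List Char) : List (List Char) × List Char :=
  match st with
  | ([], ans) => ([], ans)  -- unreachable: the deque always holds ≥ 2 items
  | (ans :: rest, _) =>
    let length := ans.length
    (rest ++ [ans.take (length / 2) ++ ['1','1'] ++ ans.drop (length / 2),
              ans.take (length / 2) ++ ['2','2'] ++ ans.drop (length / 2)], ans)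

def solve (A : Int) : String :=
  -- queue = ['11','22'], answer = ''; for _ in range(A): step  (range(A) is empty for A ≤ 0)
  let st := (List.range A.toNat).foldl (fun s _ => solveStep s) ([['1','1'],['2','2']], ([] : List Char))
  String.mk st.2

-- ===== PORT B =====
-- the characters of bin(m)[3:] mapped '0'→'1', '1'→'2' (one pass, MSB first), as the join in Source B
def pathDigits (m : Nat) : List Char :=
  if m ≤ 1 then [] else pathDigits (m / 2) ++ [if m % 2 = 0 then '1' else '2']
termination_by m
decreasing_by omega

def solve_alt (A : Int) : String :=
  if A ≤ 0 then "" else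
    let half := pathDigits (A + 1).toNat
    String.mk (half ++ half.reverse)

-- ===== PRECONDITION & SPEC =====
def Spec_solve (A : Int) (out : String) : Prop := out = solve_alt A
instance (A : Int) (out : String) : Decidable (Spec_solve A out) := by unfold Spec_solve; infer_instance

-- ===== CLAIM (what is proved, stated in full; the proofs are below) =====
def Claim_equal_solve : Prop := ∀ (A : Int), Dom_solve A → Spec_solve A (solve A)

-- ===== LEMMAS AND PROOFS =====

-- the string of heap node m: path word and its mirror
def nodeStr (m : Nat) : List Char := pathDigits m ++ (pathDigits m).reverse

theorem pathDigits_double (m : Nat) (hm : 1 ≤ m) :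
    pathDigits (2 * m) = pathDigits m ++ ['1'] := by
  rw [pathDigits]
  have h1 : ¬ (2 * m ≤ 1) := by omega
  have h2 : 2 * m / 2 = m := by omega
  have h3 : 2 * m % 2 = 0 := by omega
  simp [h1, h2, h3]

theorem pathDigits_double_succ (m : Nat) (hm : 1 ≤ m) :
    pathDigits (2 * m + 1) = pathDigits m ++ ['2'] := by
  rw [pathDigits]
  have h1 : ¬ (2 * m + 1 ≤ 1) := by omega
  have h2 : (2 * m + 1) / 2 = m := by omega
  have h3 : (2 * m + 1) % 2 = 1 := by omega
  simp [h1, h2, h3]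

theorem step_node (m : Nat) (hm : 1 ≤ m) (rest : List (List Char)) (ans : List Char) :
    solveStep (nodeStr m :: rest, ans)
      = (rest ++ [nodeStr (2 * m), nodeStr (2 * m + 1)], nodeStr m) := by
  simp only [solveStep, nodeStr, pathDigits_double m hm, pathDigits_double_succ m hm]
  have hl : ((pathDigits m).length + (pathDigits m).length) / 2 = (pathDigits m).length := by
    omega
  simp [hl, List.reverse_append]

theorem invar (n : Nat) :
    (List.range n).foldl (fun s _ => solveStep s) ([['1','1'],['2','2']], ([] : List Char))
      = ((List.range' (n + 2) (n + 2)).map nodeStr,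
         if n = 0 then [] else nodeStr (n + 1)) := by
  induction n with
  | zero =>
    have h2 : nodeStr 2 = ['1','1'] := by
      simp [nodeStr, pathDigits]
    have h3 : nodeStr 3 = ['2','2'] := by
      simp [nodeStr, pathDigits]
    simp [List.range', h2, h3]
  | succ k ih =>
    rw [List.range_succ, List.foldl_append, ih]
    have hcons : List.range' (k + 2) (k + 2) = (k + 2) :: List.range' (k + 3) (k + 1) := by
      rw [List.range'_succ]
    have ha : (k + 3) + 1 * (k + 1) = 2 * k + 4 := by omega
    have hb : (k + 3) + 1 * (k + 2) = 2 * k + 5 := by omega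
    have hsnoc2 : List.range' (k + 3) (k + 2) = List.range' (k + 3) (k + 1) ++ [2 * k + 4] := by
      rw [List.range'_concat, ha]
    have hsnoc3 : List.range' (k + 3) (k + 3) = List.range' (k + 3) (k + 2) ++ [2 * k + 5] := by
      rw [List.range'_concat, hb]
    simp only [List.foldl_cons, List.foldl_nil, hcons, List.map_cons]
    rw [step_node (k + 2) (by omega)]
    have e2 : 2 * (k + 2) + 1 = 2 * k + 5 := by omega
    have e1 : 2 * (k + 2) = 2 * k + 4 := by omega
    rw [e2, e1]
    simp [hsnoc3, hsnoc2]

theorem solve_eq_alt (A : Int) : solve A = solve_alt A := by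
  by_cases h : A ≤ 0
  · have : A.toNat = 0 := by omega
    simp [solve, solve_alt, this, h]
    rfl
  · have hn : 1 ≤ A.toNat := by omega
    have hA1 : (A + 1).toNat = A.toNat + 1 := by omega
    rw [solve, solve_alt, if_neg h, invar A.toNat]
    simp only [hA1]
    have : A.toNat ≠ 0 := by omega
    simp [this, nodeStr]

-- ===== VERDICT (by name: the statement is the Claim_ definition above) =====
theorem solve_spec : Claim_equal_solve := by
  intro A _
  unfold Spec_solve
  exact solve_eq_alt A
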